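-- pv_equiv track=rewrite | github.com/KISHAN8888/kishan-tripathi-wasserstoff-AiInternTask | testchunking2.py | get_paragraph_chunks
-- ===== SOURCE A (Python) =====
-- def get_paragraph_chunks(text):
--     # Split the job description into paragraphs
--     paragraphs = [para.strip() for para in text.strip().split('\n\n') if para.strip()]
--
--     # Final list of chunks
--     final_chunks = []
--
--     # Iterate through the paragraphs and merge small chunks
--     temp_chunk = ""
--
--     for para in paragraphs:
--         # Count the number of words in the current paragraph
--         word_count = len(para.split())
--
--         # If the temp_chunk is not empty, add it to the final_chunks
--         if temp_chunk:
--             temp_chunk += " " + para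
--         else:
--             temp_chunk = para
--
--         # If the current word count plus temp_chunk's count is less than 50, continue merging
--         if len(temp_chunk.split()) < 50:
--             continue
--         else:
--             final_chunks.append(temp_chunk)
--             temp_chunk = ""
--
--     # Add any remaining chunk if it's not empty
--     if temp_chunk:
--         final_chunks.append(temp_chunk)
--
--     return final_chunks
-- ===== SOURCE B (Python) =====
-- def get_paragraph_chunks(text):
--     # Same paragraph extraction as the spec: strip, split on blank lines, drop empties
--     paragraphs = [para.strip() for para in text.strip().split('\n\n') if para.strip()]
--
--     # Pass 1: a word-count table, folded into the sizes (paragraph counts) of the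
--     # complete >=50-word groups; k is the size of the trailing partial group.
--     counts = [len(para.split()) for para in paragraphs]
--     sizes = []
--     running = 0
--     k = 0
--     for c in counts:
--         running += c
--         k += 1
--         if running >= 50:
--             sizes.append(k)
--             running = 0
--             k = 0
--
--     # Pass 2: split the paragraph list by those sizes and join each group.
--     chunks = []
--     rest = paragraphs
--     for size in sizes:
--         chunks.append(' '.join(rest[:size]))
--         rest = rest[size:]
--     if k:
--         chunks.append(' '.join(rest))
--     return chunks
-- ===== Notes on version B (the rewrite author's own statement) =====
-- stated objective: alternative
-- what changed: Replaces A's single grow-and-flush streaming loop over a string accumulator (which re-splits the growing chunk to count its words at every step) with a table-then-group decomposition: one pass builds a per-paragraph word-count table and folds it into group sizes, a second pass slices the paragraph list by those sizes and space-joins each group.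
import Mathlib
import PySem

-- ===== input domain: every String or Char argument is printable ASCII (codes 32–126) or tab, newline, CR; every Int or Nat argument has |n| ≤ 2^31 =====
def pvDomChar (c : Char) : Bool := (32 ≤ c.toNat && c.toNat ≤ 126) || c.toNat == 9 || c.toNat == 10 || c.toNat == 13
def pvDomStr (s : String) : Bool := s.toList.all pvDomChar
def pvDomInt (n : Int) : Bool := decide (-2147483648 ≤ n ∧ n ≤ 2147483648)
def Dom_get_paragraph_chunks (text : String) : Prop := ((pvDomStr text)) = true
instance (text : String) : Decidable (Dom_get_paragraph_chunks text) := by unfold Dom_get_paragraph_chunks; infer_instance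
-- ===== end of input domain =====

-- B replaces A's grow-and-flush streaming loop with two passes: a per-paragraph
-- word-count table folded into group sizes, then slicing the paragraph list by
-- those sizes and joining each group (alternative decomposition, same result).


-- shared by both Pythons verbatim: [para.strip() for para in text.strip().split('\n\n') if para.strip()]
def pvParagraphs (text : String) : List (List Char) :=
  ((PySem.Chars.splitOn (PySem.Chars.strip text.toList) ['\n', '\n']).map
      PySem.Chars.strip).filter (fun p => !p.isEmpty)

-- ===== PORT A =====
-- loop body of A: state = (final_chunks, temp_chunk)
def pvStepA (st : List (List Char) × List Char) (para : List Char) :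
    List (List Char) × List Char :=
  let _word_count := (PySem.Chars.split₀ para).length  -- computed but unused, as in A
  let temp_chunk := if st.2.isEmpty then para else st.2 ++ ' ' :: para
  if (PySem.Chars.split₀ temp_chunk).length < 50 then (st.1, temp_chunk)
  else (st.1 ++ [temp_chunk], [])

def get_paragraph_chunks (text : String) : List String :=
  let paragraphs := pvParagraphs text
  let st := paragraphs.foldl pvStepA ([], [])
  let final_chunks := if st.2.isEmpty then st.1 else st.1 ++ [st.2]
  final_chunks.map String.ofList

-- ===== PORT B =====
-- pass-1 loop body of B: state = (sizes, running, k)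
def pvStep1 (st : List Nat × Nat × Nat) (c : Nat) : List Nat × Nat × Nat :=
  let running := st.2.1 + c
  let k := st.2.2 + 1
  if 50 ≤ running then (st.1 ++ [k], 0, 0) else (st.1, running, k)

-- pass-2 loop body of B: state = (chunks, rest); rest[:size] / rest[size:] are take / drop
def pvStep2 (st : List (List Char) × List (List Char)) (size : Nat) :
    List (List Char) × List (List Char) :=
  (st.1 ++ [PySem.Chars.join [' '] (st.2.take size)], st.2.drop size)

def get_paragraph_chunks_alt (text : String) : List String :=
  let paragraphs := pvParagraphs text
  let counts := paragraphs.map (fun para => (PySem.Chars.split₀ para).length)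
  let st1 := counts.foldl pvStep1 ([], 0, 0)
  let st2 := st1.1.foldl pvStep2 ([], paragraphs)
  let chunks := if st1.2.2 ≠ 0 then st2.1 ++ [PySem.Chars.join [' '] st2.2] else st2.1
  chunks.map String.ofList

-- ===== PRECONDITION & SPEC =====
def Spec_get_paragraph_chunks (text : String) (out : List String) : Prop := out = get_paragraph_chunks_alt text
instance (text : String) (out : List String) : Decidable (Spec_get_paragraph_chunks text out) := by unfold Spec_get_paragraph_chunks; infer_instance

-- ===== CLAIM (what is proved, stated in full; the proofs are below) =====
def Claim_equal_get_paragraph_chunks : Prop := ∀ (text : String), Dom_get_paragraph_chunks text → Spec_get_paragraph_chunks text (get_paragraph_chunks text)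

-- ===== LEMMAS AND PROOFS =====

-- word count of a paragraph / joined chunk
def pvCnt (p : List Char) : Nat := (PySem.Chars.split₀ p).length

-- reference greedy grouping: complete (≥50-word) groups and the trailing group
def pvSplitG : List (List Char) → List (List Char) → Nat → (List (List (List Char)) × List (List Char))
  | [], g, _ => ([], g)
  | p :: rest, g, r =>
    if r + pvCnt p < 50 then pvSplitG rest (g ++ [p]) (r + pvCnt p)
    else
      let s := pvSplitG rest [] 0
      ((g ++ [p]) :: s.1, s.2)

theorem pvGo_acc (s : List Char) : ∀ (cur : List Char) (acc : List (List Char)),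
    PySem.Chars.split₀.go s cur acc = acc.reverse ++ PySem.Chars.split₀.go s cur [] := by
  induction s with
  | nil =>
    intro cur acc
    by_cases hc : cur.isEmpty = true <;> simp [PySem.Chars.split₀.go, hc]
  | cons c rest ih =>
    intro cur acc
    simp only [PySem.Chars.split₀.go]
    by_cases hs : PySem.Chars.isspace c = true
    · rw [if_pos hs, if_pos hs]
      by_cases hc : cur.isEmpty = true
      · rw [if_pos hc, if_pos hc, ih [] acc]
      · rw [if_neg hc, if_neg hc, ih [] (cur.reverse :: acc), ih [] [cur.reverse]]
        simp
    · rw [if_neg hs, if_neg hs, ih (c :: cur) acc]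

theorem pvGo_space (b : List Char) : ∀ (a cur : List Char) (acc : List (List Char)),
    PySem.Chars.split₀.go (a ++ ' ' :: b) cur acc
      = PySem.Chars.split₀.go a cur acc ++ PySem.Chars.split₀.go b [] [] := by
  intro a
  induction a with
  | nil =>
    intro cur acc
    have hsp : PySem.Chars.isspace ' ' = true := by decide
    simp only [List.nil_append, PySem.Chars.split₀.go, hsp, if_true]
    by_cases hc : cur.isEmpty = true
    · rw [if_pos hc, if_pos hc]
      exact pvGo_acc b [] acc
    · rw [if_neg hc, if_neg hc, pvGo_acc b [] (cur.reverse :: acc)]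
  | cons c a ih =>
    intro cur acc
    simp only [List.cons_append, PySem.Chars.split₀.go]
    by_cases hs : PySem.Chars.isspace c = true
    · rw [if_pos hs, if_pos hs]
      by_cases hc : cur.isEmpty = true
      · rw [if_pos hc, if_pos hc, ih [] acc]
      · rw [if_neg hc, if_neg hc, ih [] (cur.reverse :: acc)]
    · rw [if_neg hs, if_neg hs, ih (c :: cur) acc]

theorem pvSplit₀_append_space (a b : List Char) :
    PySem.Chars.split₀ (a ++ ' ' :: b) = PySem.Chars.split₀ a ++ PySem.Chars.split₀ b := by
  simp [PySem.Chars.split₀, pvGo_space]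

-- join with a single space
theorem pvJoin_append_singleton (g : List (List Char)) (p : List Char) (hg : g ≠ []) :
    PySem.Chars.join [' '] (g ++ [p]) = PySem.Chars.join [' '] g ++ ' ' :: p := by
  induction g with
  | nil => exact absurd rfl hg
  | cons q g ih =>
    cases g with
    | nil => simp [PySem.Chars.join_cons_cons, PySem.Chars.join_singleton]
    | cons q' g' =>
      have h1 := PySem.Chars.join_cons_cons [' '] q q' (g' ++ [p])
      have h2 := PySem.Chars.join_cons_cons [' '] q q' g'
      have h3 := ih (by simp)
      simp only [List.cons_append] at h3 ⊢
      rw [h1, h3, h2]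
      simp

theorem pvCnt_join_append (g : List (List Char)) (p : List Char) :
    pvCnt (PySem.Chars.join [' '] (g ++ [p])) = pvCnt (PySem.Chars.join [' '] g) + pvCnt p := by
  cases g with
  | nil => simp [pvCnt, PySem.Chars.join_nil, PySem.Chars.join_singleton, PySem.Chars.split₀,
      PySem.Chars.split₀.go]
  | cons q g =>
    rw [pvJoin_append_singleton _ _ (by simp), pvCnt, pvSplit₀_append_space]
    simp [pvCnt]

theorem pvJoin_ne_nil (g : List (List Char)) (hg : g ≠ []) (hne : ∀ p ∈ g, p ≠ []) :
    PySem.Chars.join [' '] g ≠ [] := by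
  cases g with
  | nil => exact absurd rfl hg
  | cons q g =>
    cases g with
    | nil =>
      simpa [PySem.Chars.join_singleton] using hne q (by simp)
    | cons q' g' =>
      rw [PySem.Chars.join_cons_cons]
      intro h
      have := congrArg List.length h
      simp at this

theorem pvJoin_isEmpty (g : List (List Char)) (hne : ∀ p ∈ g, p ≠ []) :
    (PySem.Chars.join [' '] g).isEmpty = true ↔ g = [] := by
  constructor
  · intro h
    by_contra hg
    exact pvJoin_ne_nil g hg hne (List.isEmpty_iff.mp h)
  · intro h; simp [h, PySem.Chars.join_nil]

-- A's loop + final flush computes the joined groups of pvSplitG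
theorem pvA_loop (P : List (List Char)) : ∀ (g : List (List Char)) (fc : List (List Char)),
    (∀ p ∈ P, p ≠ []) → (∀ p ∈ g, p ≠ []) →
    (let st := P.foldl pvStepA (fc, PySem.Chars.join [' '] g)
     if st.2.isEmpty then st.1 else st.1 ++ [st.2])
    = fc ++ (pvSplitG P g (pvCnt (PySem.Chars.join [' '] g))).1.map (PySem.Chars.join [' '])
        ++ (if (pvSplitG P g (pvCnt (PySem.Chars.join [' '] g))).2 = [] then []
            else [PySem.Chars.join [' '] (pvSplitG P g (pvCnt (PySem.Chars.join [' '] g))).2]) := by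
  induction P with
  | nil =>
    intro g fc _ hg
    simp only [List.foldl_nil, pvSplitG]
    by_cases h : g = []
    · simp [h, PySem.Chars.join_nil]
    · have hE : (PySem.Chars.join [' '] g).isEmpty = false := by
        rw [Bool.eq_false_iff]
        intro hc
        exact h ((pvJoin_isEmpty g hg).mp hc)
      simp [hE, h]
  | cons p P ih =>
    intro g fc hP hg
    have hp : p ≠ [] := hP p (by simp)
    have hP' : ∀ q ∈ P, q ≠ [] := fun q hq => hP q (by simp [hq])
    have hgp : ∀ q ∈ g ++ [p], q ≠ [] := by
      intro q hq
      rcases List.mem_append.mp hq with h | h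
      · exact hg q h
      · simp at h; subst h; exact hp
    have htemp : (if (PySem.Chars.join [' '] g).isEmpty then p
        else PySem.Chars.join [' '] g ++ ' ' :: p) = PySem.Chars.join [' '] (g ++ [p]) := by
      by_cases h : g = []
      · simp [h, PySem.Chars.join_nil, PySem.Chars.join_singleton]
      · have hE : (PySem.Chars.join [' '] g).isEmpty = false := by
          rw [Bool.eq_false_iff]
          intro hc
          exact h ((pvJoin_isEmpty g hg).mp hc)
        rw [hE]
        simp [pvJoin_append_singleton g p h]
    have hcnt : (PySem.Chars.split₀ (PySem.Chars.join [' '] (g ++ [p]))).length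
        = pvCnt (PySem.Chars.join [' '] g) + pvCnt p := pvCnt_join_append g p
    simp only [List.foldl_cons, pvStepA, htemp]
    by_cases hlt : pvCnt (PySem.Chars.join [' '] g) + pvCnt p < 50
    · have h1 : (PySem.Chars.split₀ (PySem.Chars.join [' '] (g ++ [p]))).length < 50 := by
        rw [hcnt]; exact hlt
      rw [if_pos h1]
      have hih := ih (g ++ [p]) fc hP' hgp
      rw [pvCnt_join_append g p] at hih
      rw [hih]
      simp [pvSplitG, hlt]
    · have h1 : ¬ (PySem.Chars.split₀ (PySem.Chars.join [' '] (g ++ [p]))).length < 50 := by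
        rw [hcnt]; exact hlt
      rw [if_neg h1]
      have hih := ih [] (fc ++ [PySem.Chars.join [' '] (g ++ [p])]) hP' (by simp)
      simp only [PySem.Chars.join_nil] at hih
      have h0 : pvCnt ([] : List Char) = 0 := by decide
      rw [h0] at hih
      rw [hih]
      simp [pvSplitG, hlt]

-- B's pass 1 computes the group sizes and the trailing size of pvSplitG
theorem pvB_pass1 (P : List (List Char)) : ∀ (g : List (List Char)) (r k : Nat)
    (sizes : List Nat), k = g.length →
    ∃ r', (P.map pvCnt).foldl pvStep1 (sizes, r, k)
      = (sizes ++ (pvSplitG P g r).1.map List.length, r', (pvSplitG P g r).2.length) := by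
  induction P with
  | nil =>
    intro g r k sizes hk
    exact ⟨r, by simp [pvSplitG, hk]⟩
  | cons p P ih =>
    intro g r k sizes hk
    simp only [List.map_cons, List.foldl_cons, pvStep1]
    by_cases h : r + pvCnt p < 50
    · have h' : ¬ 50 ≤ r + pvCnt p := by omega
      rw [if_neg h']
      obtain ⟨r', hr'⟩ := ih (g ++ [p]) (r + pvCnt p) (k + 1) sizes (by simp [hk])
      refine ⟨r', ?_⟩
      rw [hr']
      simp [pvSplitG, h]
    · have h' : 50 ≤ r + pvCnt p := by omega
      rw [if_pos h']
      obtain ⟨r', hr'⟩ := ih [] 0 0 (sizes ++ [k + 1]) rfl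
      refine ⟨r', ?_⟩
      rw [hr']
      simp [pvSplitG, h, hk]
  -- note: pvSplitG (p :: P) g r in the else branch yields ((g ++ [p]) :: …) whose head length is g.length + 1 = k + 1

-- B's pass 2: folding over the group sizes recovers the groups
theorem pvB_pass2 (gs : List (List (List Char))) :
    ∀ (t : List (List Char)) (chunks : List (List Char)),
    (gs.map List.length).foldl pvStep2 (chunks, gs.flatten ++ t)
    = (chunks ++ gs.map (PySem.Chars.join [' ']), t) := by
  induction gs with
  | nil => intro t chunks; simp
  | cons g gs ih =>
    intro t chunks
    simp only [List.map_cons, List.foldl_cons, pvStep2, List.flatten_cons, List.append_assoc]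
    rw [List.take_left, List.drop_left]
    rw [ih t (chunks ++ [PySem.Chars.join [' '] g])]
    simp

-- the groups of pvSplitG partition g ++ P
theorem pvSplitG_flatten (P : List (List Char)) : ∀ (g : List (List Char)) (r : Nat),
    (pvSplitG P g r).1.flatten ++ (pvSplitG P g r).2 = g ++ P := by
  induction P with
  | nil => intro g r; simp [pvSplitG]
  | cons p P ih =>
    intro g r
    by_cases h : r + pvCnt p < 50
    · simp only [pvSplitG, h, if_true]
      rw [ih (g ++ [p]) (r + pvCnt p)]
      simp
    · simp only [pvSplitG, h, if_false, List.flatten_cons, List.append_assoc]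
      rw [ih [] 0]
      simp

theorem pvParagraphs_ne_nil (text : String) : ∀ p ∈ pvParagraphs text, p ≠ [] := by
  intro p hp
  simp only [pvParagraphs, List.mem_filter, Bool.not_eq_eq_eq_not, Bool.not_true] at hp
  intro h
  subst h
  simp at hp

-- ===== VERDICT (by name: the statement is the Claim_ definition above) =====
theorem get_paragraph_chunks_spec : Claim_equal_get_paragraph_chunks := by
  intro text _
  unfold Spec_get_paragraph_chunks get_paragraph_chunks get_paragraph_chunks_alt
  have hne := pvParagraphs_ne_nil text
  -- A side
  have hA := pvA_loop (pvParagraphs text) [] [] hne (by simp)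
  simp only [PySem.Chars.join_nil] at hA
  have h0 : pvCnt ([] : List Char) = 0 := by decide
  rw [h0] at hA
  simp only [List.nil_append] at hA
  -- B side
  obtain ⟨r', hB1⟩ := pvB_pass1 (pvParagraphs text) [] 0 0 [] rfl
  simp only [List.nil_append] at hB1
  have hflat := pvSplitG_flatten (pvParagraphs text) [] 0
  simp only [List.nil_append] at hflat
  have hB2 := pvB_pass2 (pvSplitG (pvParagraphs text) [] 0).1
    (pvSplitG (pvParagraphs text) [] 0).2 []
  rw [hflat] at hB2
  simp only [List.nil_append] at hB2
  have hcounts : (pvParagraphs text).map (fun para => (PySem.Chars.split₀ para).length)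
      = (pvParagraphs text).map pvCnt := rfl
  simp only [hcounts, hB1, hB2, hA]
  by_cases ht : (pvSplitG (pvParagraphs text) [] 0).2 = []
  · simp [ht]
  · have hl : (pvSplitG (pvParagraphs text) [] 0).2.length ≠ 0 := by
      simpa [List.length_eq_zero_iff] using ht
    simp [ht, hl]
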